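-- pv_equiv track=rewrite | github.com/kanonnon/prokiso | exhard/exhard-percolation-option-62101046.py | vertical_flow
-- ===== SOURCE A (Python) =====
-- def vertical_flow(isOpen):
--     """
--     引数：isOpen: list[list[bool]]
--     返値：list[list[bool]]
--     """
--     # isOpen行列の、行列の大きさを取得する
--     n = len(isOpen)
--
--     # isFull行列を初期化する
--     isFull = []
--     for i in range(n):
--         isFull.append([False] * n)
--
--     # 垂直に開放しているのか、forループでで調べる
--     for i in range(n): #行列の左から右に向かうforループ
--         for j in range(n): #行列の上から下に向かうforループ
--             if isOpen[j][i] == True: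
--                 isFull[j][i] = True
--             else:
--                 break # 対象のsiteがFalseのときは、それより下のsiteは調べないのでbreakする
--     return isFull
-- ===== SOURCE B (Python) =====
-- def vertical_flow(isOpen):
--     n = len(isOpen)
--     blocked = [False] * n
--     isFull = []
--     for row in isOpen:
--         isFull.append([row[i] and not blocked[i] for i in range(n)])
--         blocked = [blocked[i] or not row[i] for i in range(n)]
--     return isFull
-- ===== Notes on version B (the rewrite author's own statement) =====
-- stated objective: alternative
-- what changed: Column-major nested loop with break replaced by a single row-major pass that maintains a per-column 'blocked' boolean vector and rebuilds each output row functionally, so no break and no in-place matrix mutation.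
-- outside the precondition, e.g. on vertical_flow([[False, False], [True]]): A returns [[False, False], [False, False]], B raises IndexError
import Mathlib
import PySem

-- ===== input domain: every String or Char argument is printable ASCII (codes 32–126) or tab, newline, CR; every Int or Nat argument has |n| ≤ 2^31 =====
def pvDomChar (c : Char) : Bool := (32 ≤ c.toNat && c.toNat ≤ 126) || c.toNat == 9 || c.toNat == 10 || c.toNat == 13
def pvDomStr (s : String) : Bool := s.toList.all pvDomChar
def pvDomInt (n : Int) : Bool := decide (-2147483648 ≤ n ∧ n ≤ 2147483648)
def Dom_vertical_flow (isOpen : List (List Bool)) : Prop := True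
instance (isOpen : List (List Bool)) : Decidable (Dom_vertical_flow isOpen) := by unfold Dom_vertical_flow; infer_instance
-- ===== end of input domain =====

-- B replaces A's column-major nested loop with break by a single row-major pass that keeps a
-- per-column `blocked` vector and rebuilds each row functionally (objective: alternative
-- decomposition, same cost).

-- ===== PORT A =====
-- isFull[j][i] = b  (in range whenever Python A runs without IndexError; out of range List.set
-- is a no-op — such inputs are outside Pre_)
def pvSet2 (M : List (List Bool)) (j i : Nat) (b : Bool) : List (List Bool) :=
  M.set j ((M.getD j []).set i b)

-- A's inner `for j in range(n): … else: break` loop for column i over row indices js;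
-- isOpen[j][i] is read with getD, which agrees with Python indexing whenever in range (Pre_)
def pvAInner (isOpen : List (List Bool)) (i : Nat) (js : List Nat) (M : List (List Bool)) :
    List (List Bool) :=
  match js with
  | [] => M
  | j :: rest =>
    if (isOpen.getD j []).getD i false then pvAInner isOpen i rest (pvSet2 M j i true) else M

def vertical_flow (isOpen : List (List Bool)) : List (List Bool) :=
  let n := isOpen.length
  let isFull := (List.range n).foldl (fun acc _ => acc ++ [List.replicate n false]) []
  (List.range n).foldl (fun M i => pvAInner isOpen i (List.range n) M) isFull

-- ===== PORT B =====
def vertical_flow_alt (isOpen : List (List Bool)) : List (List Bool) :=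
  let n := isOpen.length
  (isOpen.foldl
    (fun (st : List (List Bool) × List Bool) row =>
      (st.1 ++ [(List.range n).map (fun i => row.getD i false && !(st.2.getD i false))],
       (List.range n).map (fun i => st.2.getD i false || !(row.getD i false))))
    ([], List.replicate n false)).1

-- ===== PRECONDITION & SPEC =====
-- Pre_ excludes inputs where some row is shorter than len(isOpen): Python A raises IndexError on
-- most of them; on the few where every access is cut off by break before reaching a short row, A
-- still returns but B itself raises IndexError there, so they stay excluded (cite in claim.json).
def Pre_vertical_flow (isOpen : List (List Bool)) : Prop :=
  ∀ row ∈ isOpen, isOpen.length ≤ row.length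
instance (isOpen : List (List Bool)) : Decidable (Pre_vertical_flow isOpen) := by
  unfold Pre_vertical_flow; infer_instance

def pvWitness_vertical_flow : List (List Bool) := [[true, false], [true, true]]

def Spec_vertical_flow (isOpen : List (List Bool)) (out : List (List Bool)) : Prop :=
  out = vertical_flow_alt isOpen
instance (isOpen : List (List Bool)) (out : List (List Bool)) :
    Decidable (Spec_vertical_flow isOpen out) := by unfold Spec_vertical_flow; infer_instance

-- ===== CLAIM (what is proved, stated in full; the proofs are below) =====
def Claim_equal_vertical_flow : Prop :=
  ∀ (isOpen : List (List Bool)), Dom_vertical_flow isOpen → Pre_vertical_flow isOpen →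
    Spec_vertical_flow isOpen (vertical_flow isOpen)

-- ===== LEMMAS AND PROOFS =====

-- entry access and the common reference matrix
def pvG (isOpen : List (List Bool)) (j i : Nat) : Bool := (isOpen.getD j []).getD i false

def pvFull (isOpen : List (List Bool)) (j i : Nat) : Bool :=
  (List.range (j + 1)).all (fun k => pvG isOpen k i)

def pvRef (isOpen : List (List Bool)) : List (List Bool) :=
  (List.range isOpen.length).map (fun j =>
    (List.range isOpen.length).map (fun i => pvFull isOpen j i))

theorem pv_getD_map_range {α : Type} (f : Nat → α) (n i : Nat) (d : α) :
    (((List.range n).map f).getD i d) = if i < n then f i else d := by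
  rcases Nat.lt_or_ge i n with h | h
  · rw [List.getD_eq_getElem _ _ (by simpa using h)]
    simp [h]
  · rw [List.getD_eq_default _ _ (by simpa using h)]
    simp [Nat.not_lt.mpr h]

theorem pv_getD_set {α : Type} (xs : List α) (j : Nat) (v d : α) (k : Nat) :
    (xs.set j v).getD k d = if k = j ∧ j < xs.length then v else xs.getD k d := by
  simp only [List.getD_eq_getElem?_getD, List.getElem?_set]
  by_cases h1 : j = k
  · subst h1
    by_cases h2 : j < xs.length
    · simp [h2]
    · simp [h2, List.getElem?_eq_none (Nat.le_of_not_lt h2)]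
  · simp [h1, Ne.symm h1]

theorem pvSet2_length (M : List (List Bool)) (j i : Nat) (b : Bool) :
    (pvSet2 M j i b).length = M.length := by
  simp [pvSet2]

theorem pvSet2_rowlen (M : List (List Bool)) (j i : Nat) (b : Bool) (j' : Nat) :
    ((pvSet2 M j i b).getD j' []).length = (M.getD j' []).length := by
  unfold pvSet2
  rw [pv_getD_set]
  split_ifs with h
  · rw [h.1]; simp
  · rfl

theorem pvSet2_entry (M : List (List Bool)) (j i : Nat) (b : Bool) (j' i' : Nat) :
    ((pvSet2 M j i b).getD j' []).getD i' false =
      if j' = j ∧ j < M.length ∧ i' = i ∧ i < (M.getD j []).length then b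
      else (M.getD j' []).getD i' false := by
  unfold pvSet2
  rw [pv_getD_set]
  by_cases h1 : j' = j ∧ j < M.length
  · rw [if_pos h1, pv_getD_set]
    by_cases h2 : i' = i ∧ i < (M.getD j []).length
    · rw [if_pos h2, if_pos ⟨h1.1, h1.2, h2.1, h2.2⟩]
    · rw [if_neg h2, if_neg (by rintro ⟨_, _, hc1, hc2⟩; exact h2 ⟨hc1, hc2⟩), h1.1]
  · rw [if_neg h1, if_neg (by rintro ⟨hc1, hc2, _⟩; exact h1 ⟨hc1, hc2⟩)]

theorem pvAInner_length (isOpen : List (List Bool)) (i : Nat) (js : List Nat)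
    (M : List (List Bool)) : (pvAInner isOpen i js M).length = M.length := by
  induction js generalizing M with
  | nil => rfl
  | cons j rest ih =>
    unfold pvAInner
    split_ifs with h
    · rw [ih, pvSet2_length]
    · rfl

theorem pvAInner_rowlen (isOpen : List (List Bool)) (i : Nat) (js : List Nat)
    (M : List (List Bool)) (j' : Nat) :
    ((pvAInner isOpen i js M).getD j' []).length = (M.getD j' []).length := by
  induction js generalizing M with
  | nil => rfl
  | cons j rest ih =>
    unfold pvAInner
    split_ifs with h
    · rw [ih, pvSet2_rowlen]
    · rfl

theorem pvAInner_entry (isOpen : List (List Bool)) (i : Nat) (a m : Nat)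
    (M : List (List Bool)) (j' i' : Nat) :
    ((pvAInner isOpen i (List.range' a m) M).getD j' []).getD i' false =
      if i' = i ∧ a ≤ j' ∧ j' < a + m ∧ (∀ k, a ≤ k → k ≤ j' → pvG isOpen k i = true)
         ∧ j' < M.length ∧ i < (M.getD j' []).length
      then true else (M.getD j' []).getD i' false := by
  induction m generalizing a M with
  | zero =>
    rw [List.range'_zero]
    show (M.getD j' []).getD i' false = _
    rw [if_neg (by rintro ⟨_, h1, h2, _⟩; omega)]
  | succ m ih =>
    rw [List.range'_succ]
    unfold pvAInner
    by_cases hg : (isOpen.getD a []).getD i false = true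
    · rw [if_pos hg, ih, pvSet2_length, pvSet2_rowlen, pvSet2_entry]
      have hga : pvG isOpen a i = true := hg
      by_cases hC' : (i' = i ∧ a + 1 ≤ j' ∧ j' < a + 1 + m
          ∧ (∀ k, a + 1 ≤ k → k ≤ j' → pvG isOpen k i = true)
          ∧ j' < M.length ∧ i < (M.getD j' []).length)
      · rw [if_pos hC', if_pos ⟨hC'.1, by omega, by omega,
          fun k hk1 hk2 => by
            rcases Nat.eq_or_lt_of_le hk1 with rfl | hlt
            · exact hga
            · exact hC'.2.2.2.1 k (by omega) hk2,
          hC'.2.2.2.2.1, hC'.2.2.2.2.2⟩]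
      · rw [if_neg hC']
        by_cases hS : (j' = a ∧ a < M.length ∧ i' = i ∧ i < (M.getD a []).length)
        · rw [if_pos hS]
          obtain ⟨hja, hal, hii, hil⟩ := hS
          subst hja
          rw [if_pos ⟨hii, le_refl _, by omega,
            fun k hk1 hk2 => by
              have hk : k = j' := by omega
              subst hk; exact hga,
            hal, hil⟩]
        · rw [if_neg hS, if_neg]
          rintro ⟨hi, haj, hjm, hall, hjl, hil⟩
          by_cases hja : j' = a
          · exact hS ⟨hja, by omega, hi, by rw [← hja]; exact hil⟩
          · exact hC' ⟨hi, by omega, by omega,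
              fun k hk1 hk2 => hall k (by omega) hk2, hjl, hil⟩
    · rw [if_neg hg, if_neg]
      have hga : pvG isOpen a i = false := by simpa using hg
      rintro ⟨hi, haj, hjm, hall, _⟩
      have hh := hall a (le_refl a) haj
      rw [hga] at hh
      exact Bool.false_ne_true hh

theorem pvOuter_length (isOpen : List (List Bool)) (is : List Nat) (M : List (List Bool)) :
    (is.foldl (fun M i => pvAInner isOpen i (List.range isOpen.length) M) M).length
      = M.length := by
  induction is generalizing M with
  | nil => rfl
  | cons i rest ih => rw [List.foldl_cons, ih, pvAInner_length]

theorem pvOuter_rowlen (isOpen : List (List Bool)) (is : List Nat) (M : List (List Bool))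
    (j' : Nat) :
    ((is.foldl (fun M i => pvAInner isOpen i (List.range isOpen.length) M) M).getD j' []).length
      = (M.getD j' []).length := by
  induction is generalizing M with
  | nil => rfl
  | cons i rest ih => rw [List.foldl_cons, ih, pvAInner_rowlen]

theorem pvOuter_entry (isOpen : List (List Bool)) (is : List Nat) (M : List (List Bool))
    (j' i' : Nat) :
    (((is.foldl (fun M i => pvAInner isOpen i (List.range isOpen.length) M) M).getD j' []).getD
        i' false) =
      if i' ∈ is ∧ j' < isOpen.length ∧ (∀ k, k ≤ j' → pvG isOpen k i' = true)
         ∧ j' < M.length ∧ i' < (M.getD j' []).length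
      then true else (M.getD j' []).getD i' false := by
  induction is generalizing M with
  | nil =>
    rw [List.foldl_nil, if_neg]
    rintro ⟨h, _⟩
    exact absurd h (List.not_mem_nil)
  | cons i rest ih =>
    rw [List.foldl_cons, ih, pvAInner_length, pvAInner_rowlen,
        List.range_eq_range', pvAInner_entry]
    by_cases hC1 : (i' ∈ rest ∧ j' < isOpen.length ∧ (∀ k, k ≤ j' → pvG isOpen k i' = true)
        ∧ j' < M.length ∧ i' < (M.getD j' []).length)
    · rw [if_pos hC1, if_pos ⟨List.mem_cons_of_mem _ hC1.1, hC1.2.1, hC1.2.2.1,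
        hC1.2.2.2.1, hC1.2.2.2.2⟩]
    · rw [if_neg hC1]
      by_cases hC2 : (i' = i ∧ 0 ≤ j' ∧ j' < 0 + isOpen.length
          ∧ (∀ k, 0 ≤ k → k ≤ j' → pvG isOpen k i = true)
          ∧ j' < M.length ∧ i < (M.getD j' []).length)
      · rw [if_pos hC2]
        obtain ⟨hii, _, hjn, hall, hjl, hil⟩ := hC2
        subst hii
        rw [if_pos ⟨List.mem_cons_self, by omega,
          fun k hk => hall k (Nat.zero_le k) hk, hjl, hil⟩]
      · rw [if_neg hC2, if_neg]
        rintro ⟨hmem, hjn, hall, hjl, hil⟩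
        rcases List.mem_cons.mp hmem with rfl | hmr
        · exact hC2 ⟨rfl, Nat.zero_le _, by omega,
            fun k _ hk => hall k hk, hjl, hil⟩
        · exact hC1 ⟨hmr, hjn, hall, hjl, hil⟩

theorem pv_foldl_append_replicate {α : Type} (m : Nat) (l : List α) (x : α) :
    (List.range m).foldl (fun acc _ => acc ++ [x]) l = l ++ List.replicate m x := by
  induction m generalizing l with
  | zero => simp
  | succ m ih =>
    rw [List.range_succ, List.foldl_append, ih, List.replicate_succ']
    simp

theorem pv_getD_replicate {α : Type} (n j : Nat) (x d : α) (h : j < n) :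
    (List.replicate n x).getD j d = x := by
  rw [List.getD_eq_getElem _ _ (by simpa using h)]
  simp

theorem pvMatExt (X Y : List (List Bool)) (hl : X.length = Y.length)
    (hr : ∀ j, j < X.length → (X.getD j []).length = (Y.getD j []).length)
    (he : ∀ j i, j < X.length → i < (X.getD j []).length →
        (X.getD j []).getD i false = (Y.getD j []).getD i false) : X = Y := by
  apply List.ext_getElem hl
  intro j h1 h2
  apply List.ext_getElem
  · have := hr j h1
    rwa [List.getD_eq_getElem _ _ h1, List.getD_eq_getElem _ _ h2] at this
  · intro i hi1 hi2
    have := he j i h1 (by rwa [List.getD_eq_getElem _ _ h1])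
    rwa [List.getD_eq_getElem _ _ h1, List.getD_eq_getElem _ _ h2,
         List.getD_eq_getElem _ _ hi1, List.getD_eq_getElem _ _ hi2] at this

theorem pvRef_length (isOpen : List (List Bool)) : (pvRef isOpen).length = isOpen.length := by
  simp [pvRef]

theorem pvRef_getD (isOpen : List (List Bool)) (j : Nat) (h : j < isOpen.length) :
    (pvRef isOpen).getD j [] = (List.range isOpen.length).map (fun i => pvFull isOpen j i) := by
  unfold pvRef
  rw [pv_getD_map_range, if_pos h]

-- A equals the reference matrix
theorem pvA_eq_ref (isOpen : List (List Bool)) : vertical_flow isOpen = pvRef isOpen := by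
  show (List.range isOpen.length).foldl
      (fun M i => pvAInner isOpen i (List.range isOpen.length) M)
      ((List.range isOpen.length).foldl
        (fun acc _ => acc ++ [List.replicate isOpen.length false]) [])
    = pvRef isOpen
  rw [pv_foldl_append_replicate, List.nil_append]
  apply pvMatExt
  · rw [pvOuter_length, List.length_replicate, pvRef_length]
  · intro j hj
    rw [pvOuter_length, List.length_replicate] at hj
    rw [pvOuter_rowlen, pv_getD_replicate _ _ _ _ hj, pvRef_getD _ _ hj]
    simp
  · intro j i hj hi
    rw [pvOuter_length, List.length_replicate] at hj
    rw [pvOuter_rowlen, pv_getD_replicate _ _ _ _ hj, List.length_replicate] at hi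
    rw [pvOuter_entry, pv_getD_replicate _ _ _ _ hj, pv_getD_replicate _ _ _ _ hi,
        List.length_replicate, pvRef_getD _ _ hj, pv_getD_map_range, if_pos hi]
    have hmem : i ∈ List.range isOpen.length := List.mem_range.mpr hi
    by_cases hall : ∀ k, k ≤ j → pvG isOpen k i = true
    · rw [if_pos ⟨hmem, hj, hall, hj, by simpa using hi⟩]
      unfold pvFull
      symm
      rw [List.all_eq_true]
      intro k hk
      exact hall k (by simpa [Nat.lt_succ_iff] using List.mem_range.mp hk)
    · rw [if_neg (by rintro ⟨_, _, h, _⟩; exact hall h)]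
      unfold pvFull
      symm
      rw [List.all_eq_false]
      push_neg at hall
      rcases hall with ⟨k, hk1, hk2⟩
      exact ⟨k, List.mem_range.mpr (by omega), by simpa using hk2⟩

-- B-side invariant
def pvBlocked (isOpen : List (List Bool)) (j : Nat) : List Bool :=
  (List.range isOpen.length).map (fun i => !((List.range j).all (fun k => pvG isOpen k i)))

theorem pvBlocked_zero (isOpen : List (List Bool)) :
    pvBlocked isOpen 0 = List.replicate isOpen.length false := by
  unfold pvBlocked
  rw [List.eq_replicate_iff]
  constructor
  · simp
  · intro b hb
    rcases List.mem_map.mp hb with ⟨i, _, rfl⟩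
    simp

theorem pvB_inv (isOpen : List (List Bool)) (m : Nat) :
    ∀ (j : Nat) (acc : List (List Bool)), j + m = isOpen.length →
    ((isOpen.drop j).foldl
      (fun (st : List (List Bool) × List Bool) row =>
        (st.1 ++ [(List.range isOpen.length).map
            (fun i => row.getD i false && !(st.2.getD i false))],
         (List.range isOpen.length).map
            (fun i => st.2.getD i false || !(row.getD i false))))
      (acc, pvBlocked isOpen j)).1
      = acc ++ (List.range' j m).map (fun j' =>
          (List.range isOpen.length).map (fun i => pvFull isOpen j' i)) := by
  induction m with
  | zero =>
    intro j acc hj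
    rw [List.drop_eq_nil_of_le (by omega), List.foldl_nil, List.range'_zero, List.map_nil,
        List.append_nil]
  | succ m ih =>
    intro j acc hj
    have hjlt : j < isOpen.length := by omega
    rw [List.drop_eq_getElem_cons hjlt, List.foldl_cons]
    have hrow : isOpen[j] = isOpen.getD j [] := (List.getD_eq_getElem _ _ hjlt).symm
    have hcell : (List.range isOpen.length).map
        (fun i => isOpen[j].getD i false && !((pvBlocked isOpen j).getD i false))
        = (List.range isOpen.length).map (fun i => pvFull isOpen j i) := by
      apply List.map_congr_left
      intro i hi
      have hi' : i < isOpen.length := List.mem_range.mp hi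
      rw [hrow]
      unfold pvBlocked
      rw [pv_getD_map_range, if_pos hi', Bool.not_not]
      unfold pvFull
      rw [List.range_succ, List.all_append]
      simp [pvG, Bool.and_comm]
    have hblk : (List.range isOpen.length).map
        (fun i => (pvBlocked isOpen j).getD i false || !(isOpen[j].getD i false))
        = pvBlocked isOpen (j + 1) := by
      unfold pvBlocked
      apply List.map_congr_left
      intro i hi
      have hi' : i < isOpen.length := List.mem_range.mp hi
      rw [pv_getD_map_range, if_pos hi', hrow, List.range_succ, List.all_append]
      simp [pvG]
    rw [hcell, hblk, ih (j + 1) _ (by omega), List.range'_succ, List.map_cons]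
    simp

-- B equals the reference matrix
theorem pvB_eq_ref (isOpen : List (List Bool)) : vertical_flow_alt isOpen = pvRef isOpen := by
  show (isOpen.foldl
      (fun (st : List (List Bool) × List Bool) row =>
        (st.1 ++ [(List.range isOpen.length).map
            (fun i => row.getD i false && !(st.2.getD i false))],
         (List.range isOpen.length).map
            (fun i => st.2.getD i false || !(row.getD i false))))
      ([], List.replicate isOpen.length false)).1 = pvRef isOpen
  rw [← pvBlocked_zero]
  have hinv := pvB_inv isOpen isOpen.length 0 [] (by omega)
  rw [List.drop_zero] at hinv
  rw [hinv, List.nil_append, ← List.range_eq_range']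
  rfl

-- ===== VERDICT (by name: the statement is the Claim_ definition above) =====
theorem vertical_flow_spec : Claim_equal_vertical_flow := by
  intro isOpen _ _
  unfold Spec_vertical_flow
  rw [pvA_eq_ref, pvB_eq_ref]
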